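-- pv_equiv track=rewrite | github.com/github991127/Leetcode | test/230923美团/1. 成绩突破峰值.py | solve
-- ===== SOURCE A (Python) =====
-- def solve(n, nums):
--     max = nums[0]
--     min = nums[0]
--     count = 0
--     for i in range(1, n):
--         if nums[i] > max:
--             count += 1
--             max = nums[i]
--         elif nums[i] < min:
--             count += 1
--             min = nums[i]
--     return count
-- ===== SOURCE B (Python) =====
-- def solve(n, nums):
--     # Phase 1: prefix-maximum and prefix-minimum tables over nums[0..n-1].
--     pmax = [nums[0]]
--     pmin = [nums[0]]
--     for i in range(1, n):
--         pmax.append(pmax[-1] if pmax[-1] >= nums[i] else nums[i])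
--         pmin.append(pmin[-1] if pmin[-1] <= nums[i] else nums[i])
--     # Phase 2: count indices that strictly beat the previous prefix extremum.
--     count = 0
--     for i in range(1, n):
--         if nums[i] > pmax[i - 1] or nums[i] < pmin[i - 1]:
--             count += 1
--     return count
-- ===== Notes on version B (the rewrite author's own statement) =====
-- stated objective: alternative
-- what changed: Replaces A's single fused scan carrying running max/min in two variables by a two-phase table algorithm: first build prefix-max and prefix-min arrays, then a separate counting pass comparing each element against the table entry one position earlier.
import Mathlib
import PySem

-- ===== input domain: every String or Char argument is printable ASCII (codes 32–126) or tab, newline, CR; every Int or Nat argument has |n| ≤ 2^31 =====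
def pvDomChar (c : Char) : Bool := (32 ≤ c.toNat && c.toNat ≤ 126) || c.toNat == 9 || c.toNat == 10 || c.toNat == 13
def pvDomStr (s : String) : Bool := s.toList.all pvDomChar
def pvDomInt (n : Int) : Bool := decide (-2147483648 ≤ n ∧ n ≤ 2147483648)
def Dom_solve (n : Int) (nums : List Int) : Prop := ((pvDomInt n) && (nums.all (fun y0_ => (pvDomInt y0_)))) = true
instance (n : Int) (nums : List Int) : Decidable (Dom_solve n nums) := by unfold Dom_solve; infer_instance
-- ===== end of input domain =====

-- B replaces A's fused running-max/min scan by a prefix-max/prefix-min table-building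
-- phase followed by a separate counting pass (objective: alternative decomposition).

-- ===== PORT A =====
-- one step of A's loop body: state is (max, min, count)
def stepA (nums : List Int) (st : Int × Int × Int) (i : Int) : Int × Int × Int :=
  let v := PySem.List.pyGetD nums i 0
  if v > st.1 then (v, st.2.1, st.2.2 + 1)
  else if v < st.2.1 then (st.1, v, st.2.2 + 1)
  else st

def solve (n : Int) (nums : List Int) : Int :=
  ((PySem.List.pyRange 1 n 1).foldl (stepA nums)
    (PySem.List.pyGetD nums 0 0, PySem.List.pyGetD nums 0 0, 0)).2.2

-- ===== PORT B =====
-- phase-1 step: append to the prefix-max / prefix-min tables (pmax[-1], pmin[-1] reads)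
def stepB (nums : List Int) (p : List Int × List Int) (i : Int) : List Int × List Int :=
  let v := PySem.List.pyGetD nums i 0
  let lm := PySem.List.pyGetD p.1 (-1) 0
  let ln := PySem.List.pyGetD p.2 (-1) 0
  (p.1 ++ [if lm ≥ v then lm else v], p.2 ++ [if ln ≤ v then ln else v])

-- phase-2 step: count i with nums[i] > pmax[i-1] or nums[i] < pmin[i-1]
def stepC (nums pm pn : List Int) (c : Int) (i : Int) : Int :=
  if PySem.List.pyGetD nums i 0 > PySem.List.pyGetD pm (i - 1) 0 ∨
     PySem.List.pyGetD nums i 0 < PySem.List.pyGetD pn (i - 1) 0 then c + 1 else c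

def solve_alt (n : Int) (nums : List Int) : Int :=
  let p := (PySem.List.pyRange 1 n 1).foldl (stepB nums)
    ([PySem.List.pyGetD nums 0 0], [PySem.List.pyGetD nums 0 0])
  (PySem.List.pyRange 1 n 1).foldl (stepC nums p.1 p.2) 0

-- ===== PRECONDITION & SPEC =====
-- Pre_ excludes exactly the inputs where the Python A raises IndexError:
-- empty nums (nums[0]) and n exceeding len(nums) (nums[i] for i up to n-1).
def Pre_solve (n : Int) (nums : List Int) : Prop := nums ≠ [] ∧ n ≤ nums.length
instance (n : Int) (nums : List Int) : Decidable (Pre_solve n nums) := by unfold Pre_solve; infer_instance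
def pvWitness_solve : Int × List Int := (4, [3, 1, 4, 2])

def Spec_solve (n : Int) (nums : List Int) (out : Int) : Prop := out = solve_alt n nums
instance (n : Int) (nums : List Int) (out : Int) : Decidable (Spec_solve n nums out) := by unfold Spec_solve; infer_instance

-- ===== CLAIM (what is proved, stated in full; the proofs are below) =====
def Claim_equal_solve : Prop := ∀ (n : Int) (nums : List Int), Dom_solve n nums → Pre_solve n nums → Spec_solve n nums (solve n nums)

-- ===== LEMMAS AND PROOFS =====

-- named forms of the two folds, definitionally equal to the port bodies
def Afold (nums : List Int) (m : Int) : Int × Int × Int :=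
  (PySem.List.pyRange 1 m 1).foldl (stepA nums)
    (PySem.List.pyGetD nums 0 0, PySem.List.pyGetD nums 0 0, 0)

def Bfold (nums : List Int) (m : Int) : List Int × List Int :=
  (PySem.List.pyRange 1 m 1).foldl (stepB nums)
    ([PySem.List.pyGetD nums 0 0], [PySem.List.pyGetD nums 0 0])

def Cfold (nums pm pn : List Int) (m : Int) : Int :=
  (PySem.List.pyRange 1 m 1).foldl (stepC nums pm pn) 0

-- pyGetD of an appended singleton at an in-range nonnegative index ignores the new element
lemma pyGetD_append_left (xs : List Int) (y : Int) (i : Int) (d : Int)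
    (h0 : 0 ≤ i) (h1 : i < xs.length) :
    PySem.List.pyGetD (xs ++ [y]) i d = PySem.List.pyGetD xs i d := by
  rw [PySem.List.pyGetD_of_nonneg _ _ h0, PySem.List.pyGetD_of_nonneg _ _ h0]
  have : i.toNat < xs.length := by omega
  simp [List.getD, List.getElem?_append_left this]

-- Invariant tying A's fused state to B's tables after processing range(1, 1+k):
-- table lengths, last table entries = A's running max/min, min ≤ max, counts agree.
lemma key_invariant (nums : List Int) (k : Nat) :
    (Bfold nums (1 + k)).1.length = k + 1 ∧ (Bfold nums (1 + k)).2.length = k + 1 ∧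
    (Bfold nums (1 + k)).1.getLast? = some (Afold nums (1 + k)).1 ∧
    (Bfold nums (1 + k)).2.getLast? = some (Afold nums (1 + k)).2.1 ∧
    (Afold nums (1 + k)).2.1 ≤ (Afold nums (1 + k)).1 ∧
    Cfold nums (Bfold nums (1 + k)).1 (Bfold nums (1 + k)).2 (1 + k) = (Afold nums (1 + k)).2.2 := by
  induction k with
  | zero =>
    simp [Afold, Bfold, Cfold]
  | succ k ih =>
    obtain ⟨hL1, hL2, hlast1, hlast2, hmn, hc⟩ := ih
    have hcast : (1 + ((k + 1 : Nat) : Int)) = (1 + (k : Int)) + 1 := by push_cast; ring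
    have hR : PySem.List.pyRange 1 (1 + ((k + 1 : Nat) : Int)) 1
        = PySem.List.pyRange 1 (1 + (k : Int)) 1 ++ [1 + (k : Int)] := by
      rw [hcast, PySem.List.pyRange_one_succ_right (by omega)]
    have hne1 : (Bfold nums (1 + k)).1 ≠ [] := by
      intro h; rw [h] at hL1; simp at hL1
    have hne2 : (Bfold nums (1 + k)).2 ≠ [] := by
      intro h; rw [h] at hL2; simp at hL2
    have hlm : PySem.List.pyGetD (Bfold nums (1 + k)).1 (-1) 0 = (Afold nums (1 + k)).1 := by
      rw [PySem.List.pyGetD_neg_one _ _ hne1]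
      have := List.getLast?_eq_some_getLast hne1
      rw [this] at hlast1; exact Option.some.inj hlast1
    have hln : PySem.List.pyGetD (Bfold nums (1 + k)).2 (-1) 0 = (Afold nums (1 + k)).2.1 := by
      rw [PySem.List.pyGetD_neg_one _ _ hne2]
      have := List.getLast?_eq_some_getLast hne2
      rw [this] at hlast2; exact Option.some.inj hlast2
    have hA : Afold nums (1 + (k + 1 : Nat)) = stepA nums (Afold nums (1 + k)) (1 + k) := by
      unfold Afold; rw [hR, List.foldl_append]; rfl
    have hB : Bfold nums (1 + (k + 1 : Nat)) = stepB nums (Bfold nums (1 + k)) (1 + k) := by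
      unfold Bfold; rw [hR, List.foldl_append]; rfl
    set mx := (Afold nums (1 + k)).1 with hmx
    set mn := (Afold nums (1 + k)).2.1 with hmn'
    set c := (Afold nums (1 + k)).2.2 with hc'
    set v := PySem.List.pyGetD nums (1 + (k : Int)) 0 with hv
    have hBP1 : (Bfold nums (1 + (k + 1 : Nat))).1
        = (Bfold nums (1 + k)).1 ++ [if mx ≥ v then mx else v] := by
      rw [hB]; simp [stepB, hlm, hln, ← hv]
    have hBP2 : (Bfold nums (1 + (k + 1 : Nat))).2
        = (Bfold nums (1 + k)).2 ++ [if mn ≤ v then mn else v] := by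
      rw [hB]; simp [stepB, hlm, hln, ← hv]
    have hA1 : (Afold nums (1 + (k + 1 : Nat))).1 = if mx ≥ v then mx else v := by
      rw [hA]; simp only [stepA]; split_ifs with h1 h2 h3 h4 <;> simp_all <;> omega
    have hA2 : (Afold nums (1 + (k + 1 : Nat))).2.1 = if mn ≤ v then mn else v := by
      rw [hA]; simp only [stepA]; split_ifs with h1 h2 h3 h4 <;> simp_all <;> omega
    have hA3 : (Afold nums (1 + (k + 1 : Nat))).2.2 = if v > mx ∨ v < mn then c + 1 else c := by
      rw [hA]; simp only [stepA]; split_ifs with h1 h2 h3 h4 <;> simp_all <;> omega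
    refine ⟨?_, ?_, ?_, ?_, ?_, ?_⟩
    · rw [hBP1]; simp [hL1]
    · rw [hBP2]; simp [hL2]
    · rw [hBP1, hA1]; simp
    · rw [hBP2, hA2]; simp
    · rw [hA1, hA2]; split_ifs <;> omega
    · unfold Cfold
      rw [hR, List.foldl_append]
      have hcong : (PySem.List.pyRange 1 (1 + (k : Int)) 1).foldl
          (stepC nums (Bfold nums (1 + (k+1 : Nat))).1 (Bfold nums (1 + (k+1 : Nat))).2) 0
          = (PySem.List.pyRange 1 (1 + (k : Int)) 1).foldl
          (stepC nums (Bfold nums (1 + k)).1 (Bfold nums (1 + k)).2) 0 := by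
        apply PySem.List.foldl_congr_mem
        intro acc x hx
        rw [PySem.List.mem_pyRange_one] at hx
        unfold stepC
        rw [hBP1, hBP2, pyGetD_append_left _ _ _ _ (by omega) (by omega),
            pyGetD_append_left _ _ _ _ (by omega) (by omega)]
      rw [List.foldl_cons, List.foldl_nil, hcong]
      show stepC nums _ _ (Cfold nums (Bfold nums (1+k)).1 (Bfold nums (1+k)).2 (1+k)) _ = _
      rw [hc, hA3]
      unfold stepC
      have hg1 : PySem.List.pyGetD (Bfold nums (1 + (k+1:Nat))).1 (1 + (k:Int) - 1) 0 = mx := by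
        rw [hBP1, pyGetD_append_left _ _ _ _ (by omega) (by omega)]
        rw [show (1 + (k:Int) - 1) = (k:Int) by ring, PySem.List.pyGetD_natCast]
        have : (Bfold nums (1+k)).1.getD k 0 = ((Bfold nums (1+k)).1.getLast?).getD 0 := by
          rw [List.getLast?_eq_getElem?]
          simp [List.getD, hL1]
        rw [this, hlast1]; rfl
      have hg2 : PySem.List.pyGetD (Bfold nums (1 + (k+1:Nat))).2 (1 + (k:Int) - 1) 0 = mn := by
        rw [hBP2, pyGetD_append_left _ _ _ _ (by omega) (by omega)]
        rw [show (1 + (k:Int) - 1) = (k:Int) by ring, PySem.List.pyGetD_natCast]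
        have : (Bfold nums (1+k)).2.getD k 0 = ((Bfold nums (1+k)).2.getLast?).getD 0 := by
          rw [List.getLast?_eq_getElem?]
          simp [List.getD, hL2]
        rw [this, hlast2]; rfl
      rw [hg1, hg2, ← hv]

-- ===== VERDICT (by name: the statement is the Claim_ definition above) =====
theorem solve_spec : Claim_equal_solve := by
  intro n nums _ _
  unfold Spec_solve
  show (Afold nums n).2.2 = Cfold nums (Bfold nums n).1 (Bfold nums n).2 n
  by_cases h : n ≤ 1
  · have hR : PySem.List.pyRange 1 n 1 = [] := by
      rw [List.eq_nil_iff_forall_not_mem]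
      intro x hx; rw [PySem.List.mem_pyRange_one] at hx; omega
    simp [Afold, Bfold, Cfold, hR]
  · obtain ⟨k, hk⟩ : ∃ k : Nat, n = 1 + (k : Int) := ⟨(n - 1).toNat, by omega⟩
    subst hk
    exact ((key_invariant nums k).2.2.2.2.2).symm
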